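-- pv_equiv track=rewrite | github.com/Streak306/PerfectLayout | core.py | count_free_2x2_slots
-- ===== SOURCE A (Python) =====
-- from typing import Dict, List, Tuple, Optional, Callable, Iterable
--
-- def count_free_2x2_slots(
--     map_w: int,
--     map_h: int,
--     blocked: set[Tuple[int,int]],
--     occ: set[Tuple[int,int]],
--     chunk_size: int = 4,
-- ) -> int:
--     """Quantidade de posições 2x2 totalmente livres (sem cruzar chunk)."""
--     free = 0
--     for cy in range(0, map_h, chunk_size):
--         if cy + chunk_size > map_h:
--             break
--         for cx in range(0, map_w, chunk_size):
--             if cx + chunk_size > map_w: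
--                 break
--             for dy in range(0, chunk_size, 2):
--                 for dx in range(0, chunk_size, 2):
--                     ok = True
--                     for yy in range(cy + dy, cy + dy + 2):
--                         for xx in range(cx + dx, cx + dx + 2):
--                             if xx >= map_w or yy >= map_h or (xx, yy) in blocked or (xx, yy) in occ:
--                                 ok = False
--                                 break
--                         if not ok:
--                             break
--                     if ok:
--                         free += 1
--     return free
-- ===== SOURCE B (Python) =====
-- def count_free_2x2_slots(
--     map_w: int,
--     map_h: int,
--     blocked: set,
--     occ: set,
--     chunk_size: int = 4,
-- ) -> int:
--     """Count by formula, subtracting slots killed by bad cells, instead of scanning the grid."""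
--     c = chunk_size
--     if c <= 0:
--         return 0
--     ncx = map_w // c
--     ncy = map_h // c
--     if ncx <= 0 or ncy <= 0:
--         return 0
--     spc = (c + 1) // 2  # slot starts per chunk per axis
--     # usable slot starts per axis: all i*c + 2*b (i < nc, b < spc) whose 2-cell span stays
--     # inside the map; only the very last start can stick out (odd c, dim == nc*c)
--     nx = ncx * spc - (1 if c % 2 == 1 and ncx * c == map_w else 0)
--     ny = ncy * spc - (1 if c % 2 == 1 and ncy * c == map_h else 0)
--
--     def starts(v, n, limit):
--         # usable slot starts s with s <= v <= s+1
--         out = []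
--         for s in (v - 1, v):
--             q, r = divmod(s, c)
--             if 0 <= q < n and r % 2 == 0 and s + 1 < limit:
--                 out.append(s)
--         return out
--
--     dead = set()
--     for (x, y) in set(blocked) | set(occ):
--         for sx in starts(x, ncx, map_w):
--             for sy in starts(y, ncy, map_h):
--                 dead.add((sx, sy))
--     return nx * ny - len(dead)
-- ===== Notes on version B (the rewrite author's own statement) =====
-- stated objective: alternative
-- what changed: Instead of scanning every chunk and every 2x2 slot of the grid, B computes the number of usable slots per axis by a closed formula and subtracts the size of the set of slots killed by blocked/occupied cells, built by mapping each bad cell to the at most four slots that contain it.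
import Mathlib
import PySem

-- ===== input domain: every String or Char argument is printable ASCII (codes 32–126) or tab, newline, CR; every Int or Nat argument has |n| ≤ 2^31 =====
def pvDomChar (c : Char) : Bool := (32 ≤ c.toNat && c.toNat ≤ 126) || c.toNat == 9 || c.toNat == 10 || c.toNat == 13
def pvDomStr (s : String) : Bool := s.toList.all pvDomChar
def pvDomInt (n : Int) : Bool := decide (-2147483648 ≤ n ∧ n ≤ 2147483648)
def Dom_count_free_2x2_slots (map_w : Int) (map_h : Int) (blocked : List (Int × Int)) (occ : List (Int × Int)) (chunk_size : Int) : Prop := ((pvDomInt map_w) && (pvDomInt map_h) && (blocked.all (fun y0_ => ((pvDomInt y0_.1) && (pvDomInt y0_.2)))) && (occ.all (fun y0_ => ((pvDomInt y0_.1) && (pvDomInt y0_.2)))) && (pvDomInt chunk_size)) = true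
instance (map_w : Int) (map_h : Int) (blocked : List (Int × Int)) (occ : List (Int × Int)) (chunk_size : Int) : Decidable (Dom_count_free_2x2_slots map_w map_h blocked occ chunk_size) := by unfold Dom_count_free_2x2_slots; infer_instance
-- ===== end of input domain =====

set_option maxHeartbeats 1000000


-- ===== PORT A =====
-- B replaces A's full grid scan by a closed-form slot count minus the set of slots hit by bad cells.
-- A-side helpers: literal transliteration of A's nested loops ('break' = stop consuming the range list;
-- the innermost ok-loop with its breaks is the short-circuit 'all' of the negated condition).
def pvA_ok (map_w map_h : Int) (blocked occ : List (Int × Int)) (sx sy : Int) : Bool :=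
  (PySem.List.pyRange sy (sy + 2) 1).all (fun yy =>
    (PySem.List.pyRange sx (sx + 2) 1).all (fun xx =>
      !(decide (xx ≥ map_w) || decide (yy ≥ map_h) || blocked.contains (xx, yy) || occ.contains (xx, yy))))

def pvA_dxLoop (map_w map_h : Int) (blocked occ : List (Int × Int)) (c sx0 sy : Int) (free : Int) : Int :=
  (PySem.List.pyRange 0 c 2).foldl
    (fun free dx => if pvA_ok map_w map_h blocked occ (sx0 + dx) sy then free + 1 else free) free

def pvA_dyLoop (map_w map_h : Int) (blocked occ : List (Int × Int)) (c cx cy : Int) (free : Int) : Int :=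
  (PySem.List.pyRange 0 c 2).foldl
    (fun free dy => pvA_dxLoop map_w map_h blocked occ c cx (cy + dy) free) free

def pvA_cxLoop (map_w map_h : Int) (blocked occ : List (Int × Int)) (c cy : Int) :
    List Int → Int → Int
  | [], free => free
  | cx :: rest, free =>
      if cx + c > map_w then free
      else pvA_cxLoop map_w map_h blocked occ c cy rest (pvA_dyLoop map_w map_h blocked occ c cx cy free)

def pvA_cyLoop (map_w map_h : Int) (blocked occ : List (Int × Int)) (c : Int) :
    List Int → Int → Int
  | [], free => free
  | cy :: rest, free =>
      if cy + c > map_h then free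
      else pvA_cyLoop map_w map_h blocked occ c rest
        (pvA_cxLoop map_w map_h blocked occ c cy (PySem.List.pyRange 0 map_w c) free)

def count_free_2x2_slots (map_w : Int) (map_h : Int) (blocked : List (Int × Int)) (occ : List (Int × Int)) (chunk_size : Int) : Int :=
  pvA_cyLoop map_w map_h blocked occ chunk_size (PySem.List.pyRange 0 map_h chunk_size) 0

-- ===== PORT B =====
-- usable slot starts s with s <= v <= s+1 (Source B's 'starts')
def pvB_starts (c v n limit : Int) : List Int :=
  [v - 1, v].foldl
    (fun out s =>
      let q := PySem.Int.floordiv s c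
      let r := PySem.Int.mod s c
      if 0 ≤ q ∧ q < n ∧ PySem.Int.mod r 2 = 0 ∧ s + 1 < limit then out ++ [s] else out) []

def count_free_2x2_slots_alt (map_w : Int) (map_h : Int) (blocked : List (Int × Int)) (occ : List (Int × Int)) (chunk_size : Int) : Int :=
  let c := chunk_size
  if c ≤ 0 then 0 else
  let ncx := PySem.Int.floordiv map_w c
  let ncy := PySem.Int.floordiv map_h c
  if ncx ≤ 0 ∨ ncy ≤ 0 then 0 else
  let spc := PySem.Int.floordiv (c + 1) 2
  let nx := ncx * spc - (if PySem.Int.mod c 2 = 1 ∧ ncx * c = map_w then 1 else 0)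
  let ny := ncy * spc - (if PySem.Int.mod c 2 = 1 ∧ ncy * c = map_h then 1 else 0)
  let dead : PySem.Set (Int × Int) :=
    (PySem.Set.union (PySem.Set.ofList blocked) occ).foldl
      (fun dead p =>
        (pvB_starts c p.1 ncx map_w).foldl
          (fun dead sx =>
            (pvB_starts c p.2 ncy map_h).foldl
              (fun dead sy => PySem.Set.add dead (sx, sy)) dead) dead)
      PySem.Set.empty
  nx * ny - (dead.length : Int)

-- ===== PRECONDITION & SPEC =====
-- Pre_ excludes only chunk_size = 0, on which Python's range(0, map_h, 0) raises ValueError.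
def Pre_count_free_2x2_slots (map_w : Int) (map_h : Int) (blocked : List (Int × Int)) (occ : List (Int × Int)) (chunk_size : Int) : Prop :=
  chunk_size ≠ 0
instance (map_w : Int) (map_h : Int) (blocked : List (Int × Int)) (occ : List (Int × Int)) (chunk_size : Int) : Decidable (Pre_count_free_2x2_slots map_w map_h blocked occ chunk_size) := by unfold Pre_count_free_2x2_slots; infer_instance

def pvWitness_count_free_2x2_slots : Int × Int × (List (Int × Int)) × (List (Int × Int)) × Int :=
  (8, 8, [(1, 1)], [(5, 2)], 4)

def Spec_count_free_2x2_slots (map_w : Int) (map_h : Int) (blocked : List (Int × Int)) (occ : List (Int × Int)) (chunk_size : Int) (out : Int) : Prop := out = count_free_2x2_slots_alt map_w map_h blocked occ chunk_size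
instance (map_w : Int) (map_h : Int) (blocked : List (Int × Int)) (occ : List (Int × Int)) (chunk_size : Int) (out : Int) : Decidable (Spec_count_free_2x2_slots map_w map_h blocked occ chunk_size out) := by unfold Spec_count_free_2x2_slots; infer_instance

-- ===== CLAIM (what is proved, stated in full; the proofs are below) =====
def Claim_equal_count_free_2x2_slots : Prop := ∀ (map_w : Int) (map_h : Int) (blocked : List (Int × Int)) (occ : List (Int × Int)) (chunk_size : Int), Dom_count_free_2x2_slots map_w map_h blocked occ chunk_size → Pre_count_free_2x2_slots map_w map_h blocked occ chunk_size → Spec_count_free_2x2_slots map_w map_h blocked occ chunk_size (count_free_2x2_slots map_w map_h blocked occ chunk_size)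
-- ===== LEMMAS AND PROOFS =====


-- Proof-side abbreviations (used only below)

def pvChunkCnt (map_w map_h : Int) (bl oc : List (Int × Int)) (c cx cy : Int) : Int :=
  ((PySem.List.pyRange 0 c 2).map (fun dy =>
    (((PySem.List.pyRange 0 c 2).countP (fun dx => pvA_ok map_w map_h bl oc (cx + dx) (cy + dy))) : Int))).sum

def pvColSum (map_w map_h : Int) (bl oc : List (Int × Int)) (c cy : Int) : Int :=
  (((PySem.List.pyRange 0 map_w c).takeWhile (fun cx => decide (cx + c ≤ map_w))).map
    (fun cx => pvChunkCnt map_w map_h bl oc c cx cy)).sum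

def pvHitB (bl oc : List (Int × Int)) (sx sy : Int) : Bool :=
  bl.contains (sx, sy) || oc.contains (sx, sy) || bl.contains (sx + 1, sy) || oc.contains (sx + 1, sy) ||
  bl.contains (sx, sy + 1) || oc.contains (sx, sy + 1) || bl.contains (sx + 1, sy + 1) || oc.contains (sx + 1, sy + 1)

def pvUX (map_w c : Int) (N S : Nat) : Finset (Nat × Nat) :=
  (Finset.range N ×ˢ Finset.range S).filter (fun v => c * v.1 + 2 * v.2 + 1 < map_w)

def pvT (map_w map_h : Int) (bl oc : List (Int × Int)) (c : Int) (N M S : Nat) : Finset ((Nat × Nat) × (Nat × Nat)) :=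
  ((pvUX map_h c M S) ×ˢ (pvUX map_w c N S)).filter
    (fun u => pvHitB bl oc (c * u.2.1 + 2 * u.2.2) (c * u.1.1 + 2 * u.1.2) = true)

-- ===== loop-shape lemmas for port A =====

lemma pv_dx (map_w map_h : Int) (bl oc : List (Int × Int)) (c sx0 sy free : Int) :
    pvA_dxLoop map_w map_h bl oc c sx0 sy free =
      free + (((PySem.List.pyRange 0 c 2).countP (fun dx => pvA_ok map_w map_h bl oc (sx0 + dx) sy)) : Int) := by
  unfold pvA_dxLoop
  exact PySem.List.foldl_if_add_one _ _ _

lemma pv_dy (map_w map_h : Int) (bl oc : List (Int × Int)) (c cx cy free : Int) :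
    pvA_dyLoop map_w map_h bl oc c cx cy free = free + pvChunkCnt map_w map_h bl oc c cx cy := by
  unfold pvA_dyLoop pvChunkCnt
  rw [PySem.List.foldl_congr_mem _ _
    (fun acc dy => acc + (((PySem.List.pyRange 0 c 2).countP (fun dx => pvA_ok map_w map_h bl oc (cx + dx) (cy + dy))) : Int)) _
    (fun acc dy _ => pv_dx map_w map_h bl oc c cx (cy + dy) acc)]
  exact PySem.List.foldl_add _ _ _

lemma pv_cx (map_w map_h : Int) (bl oc : List (Int × Int)) (c cy : Int) (l : List Int) :
    ∀ free : Int, pvA_cxLoop map_w map_h bl oc c cy l free =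
      free + ((l.takeWhile (fun cx => decide (cx + c ≤ map_w))).map
        (fun cx => pvChunkCnt map_w map_h bl oc c cx cy)).sum := by
  induction l with
  | nil => intro free; simp [pvA_cxLoop]
  | cons cx rest ih =>
      intro free
      rw [pvA_cxLoop]
      by_cases h : cx + c > map_w
      · rw [if_pos h, List.takeWhile_cons, decide_eq_false (by omega)]
        simp
      · rw [if_neg h, ih, pv_dy, List.takeWhile_cons, decide_eq_true (by omega)]
        simp [add_assoc]

lemma pv_cy (map_w map_h : Int) (bl oc : List (Int × Int)) (c : Int) (l : List Int) :
    ∀ free : Int, pvA_cyLoop map_w map_h bl oc c l free =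
      free + ((l.takeWhile (fun cy => decide (cy + c ≤ map_h))).map
        (fun cy => pvColSum map_w map_h bl oc c cy)).sum := by
  induction l with
  | nil => intro free; simp [pvA_cyLoop]
  | cons cy rest ih =>
      intro free
      rw [pvA_cyLoop]
      by_cases h : cy + c > map_h
      · rw [if_pos h, List.takeWhile_cons, decide_eq_false (by omega)]
        simp
      · rw [if_neg h, ih, pv_cx, List.takeWhile_cons, decide_eq_true (by omega)]
        simp [pvColSum, add_assoc]

-- ===== range bookkeeping =====

lemma pv_takeWhile_range' (m : Nat) : ∀ (n a : Nat),
    (List.range' a n).takeWhile (fun k => decide (k < m)) = List.range' a (min n (m - a)) := by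
  intro n
  induction n with
  | zero => intro a; simp
  | succ n ih =>
      intro a
      rw [List.range'_succ, List.takeWhile_cons]
      by_cases h : a < m
      · rw [decide_eq_true h, ih (a + 1)]
        have h1 : min (n + 1) (m - a) = (min n (m - (a + 1))) + 1 := by omega
        rw [h1, List.range'_succ]
        simp
      · rw [decide_eq_false h]
        have h1 : min (n + 1) (m - a) = 0 := by omega
        rw [h1]
        simp

lemma pv_takeWhile_range (m n : Nat) :
    (List.range n).takeWhile (fun k => decide (k < m)) = List.range (min n m) := by
  rw [List.range_eq_range', List.range_eq_range', pv_takeWhile_range' m n 0]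
  norm_num

lemma pv_range_pyRange (L c : Int) (hc : 0 < c) :
    (PySem.List.pyRange 0 L c).takeWhile (fun x => decide (x + c ≤ L)) =
      (List.range (PySem.Int.floordiv L c).toNat).map (fun k : Nat => (c * k : Int)) := by
  rw [PySem.List.pyRange_of_pos 0 L hc, List.takeWhile_map]
  have hfd : PySem.Int.floordiv L c = L / c := PySem.Int.floordiv_eq_ediv_of_pos hc
  have hpred : ((fun x => decide (x + c ≤ L)) ∘ fun k : Nat => (0 : Int) + c * k) =
      fun k : Nat => decide (k < (L / c).toNat) := by
    funext k
    have h1 : (0 : Int) + c * (k : Int) + c = ((k : Int) + 1) * c := by ring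
    simp only [Function.comp, h1]
    simp only [decide_eq_decide]
    rw [← Int.le_ediv_iff_mul_le hc]
    omega
  rw [hpred, pv_takeWhile_range]
  have hmin : min (if (0:Int) < L then ((L - 0 + c - 1) / c).toNat else 0) (L / c).toNat = (L / c).toNat := by
    by_cases hL : (0:Int) < L
    · rw [if_pos hL]
      have h2 : L / c ≤ (L - 0 + c - 1) / c := Int.ediv_le_ediv hc (by omega)
      omega
    · rw [if_neg hL]
      have h2 : L / c ≤ 0 / c := Int.ediv_le_ediv hc (by omega)
      rw [Int.zero_ediv] at h2
      omega
  rw [hmin, hfd]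
  exact List.map_congr_left (fun k _ => by simp)

lemma pv_sum_range (f : Nat → Int) (n : Nat) :
    ((List.range n).map f).sum = ∑ k ∈ Finset.range n, f k := by
  induction n with
  | zero => simp
  | succ n ih => rw [List.range_succ, List.map_append, List.sum_append, Finset.sum_range_succ, ih]; simp

lemma pv_DS (c : Int) (hc : 0 < c) :
    PySem.List.pyRange 0 c 2 =
      (List.range (PySem.Int.floordiv (c + 1) 2).toNat).map (fun k : Nat => (2 * k : Int)) := by
  rw [PySem.List.pyRange_of_pos 0 c (by norm_num)]
  have h1 : (if (0:Int) < c then ((c - 0 + 2 - 1) / 2).toNat else 0) = ((c + 1) / 2).toNat := by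
    rw [if_pos hc]
    congr 2
    ring
  rw [h1, PySem.Int.floordiv_eq_ediv_of_pos (by norm_num : (0:Int) < 2)]
  exact List.map_congr_left (fun k _ => by simp)

lemma pv_chunk (map_w map_h : Int) (bl oc : List (Int × Int)) (c cx cy : Int) (hc : 0 < c) :
    pvChunkCnt map_w map_h bl oc c cx cy =
      ∑ a ∈ Finset.range (PySem.Int.floordiv (c + 1) 2).toNat,
      ∑ b ∈ Finset.range (PySem.Int.floordiv (c + 1) 2).toNat,
        (if pvA_ok map_w map_h bl oc (cx + 2 * b) (cy + 2 * a) then (1 : Int) else 0) := by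
  unfold pvChunkCnt
  rw [pv_DS c hc, List.map_map, pv_sum_range]
  refine Finset.sum_congr rfl (fun a _ => ?_)
  simp only [Function.comp]
  rw [List.countP_map, ← PySem.List.sum_map_ite_one_zero, pv_sum_range]
  exact Finset.sum_congr rfl (fun b _ => by simp [Function.comp])

lemma pv_A_formula (map_w map_h : Int) (bl oc : List (Int × Int)) (c : Int) (hc : 0 < c) :
    count_free_2x2_slots map_w map_h bl oc c =
      ∑ j ∈ Finset.range (PySem.Int.floordiv map_h c).toNat,
      ∑ i ∈ Finset.range (PySem.Int.floordiv map_w c).toNat,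
      ∑ a ∈ Finset.range (PySem.Int.floordiv (c + 1) 2).toNat,
      ∑ b ∈ Finset.range (PySem.Int.floordiv (c + 1) 2).toNat,
        (if pvA_ok map_w map_h bl oc (c * i + 2 * b) (c * j + 2 * a) then (1 : Int) else 0) := by
  unfold count_free_2x2_slots
  rw [pv_cy, pv_range_pyRange map_h c hc, List.map_map, pv_sum_range, zero_add]
  refine Finset.sum_congr rfl (fun j _ => ?_)
  simp only [Function.comp]
  unfold pvColSum
  rw [pv_range_pyRange map_w c hc, List.map_map, pv_sum_range]
  refine Finset.sum_congr rfl (fun i _ => ?_)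
  simp only [Function.comp]
  rw [pv_chunk map_w map_h bl oc c _ _ hc]

-- ===== characterising the inner 2x2 test =====

lemma pv_pair (a : Int) : PySem.List.pyRange a (a + 2) 1 = [a, a + 1] := by
  rw [PySem.List.pyRange_one_cons (by omega), PySem.List.pyRange_one_cons (by omega),
    PySem.List.pyRange_one_eq_nil (by omega)]

lemma pv_ok_iff (map_w map_h : Int) (bl oc : List (Int × Int)) (sx sy : Int)
    (hx1 : sx + 1 ≤ map_w) (hy1 : sy + 1 ≤ map_h) :
    pvA_ok map_w map_h bl oc sx sy =
      (decide (sx + 1 < map_w) && decide (sy + 1 < map_h) && !pvHitB bl oc sx sy) := by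
  unfold pvA_ok pvHitB
  rw [pv_pair sx, pv_pair sy]
  by_cases hx : sx + 1 < map_w <;> by_cases hy : sy + 1 < map_h
  · simp [hx, hy, show ¬ (sx ≥ map_w) by omega, show ¬ (sy ≥ map_h) by omega,
      show ¬ (sx + 1 ≥ map_w) by omega, show ¬ (sy + 1 ≥ map_h) by omega]
    ac_rfl
  · simp [hx, hy, show ¬ (sx ≥ map_w) by omega, show ¬ (sy ≥ map_h) by omega]
  · simp [hx, hy, show ¬ (sx ≥ map_w) by omega, show ¬ (sy ≥ map_h) by omega]
  · simp [hx, hy, show ¬ (sx ≥ map_w) by omega, show ¬ (sy ≥ map_h) by omega]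

-- ===== from the quadruple sum to a card formula =====

lemma pv_spc_bracket (c : Int) (hc : 0 < c) :
    PySem.Int.floordiv (c + 1) 2 * 2 ≤ c + 1 ∧ c + 1 < (PySem.Int.floordiv (c + 1) 2 + 1) * 2 :=
  (PySem.Int.floordiv_eq_iff_of_pos (by norm_num)).mp rfl

lemma pv_nc_le (L c : Int) (hc : 0 < c) : PySem.Int.floordiv L c * c ≤ L := by
  rw [PySem.Int.floordiv_eq_ediv_of_pos hc]
  exact Int.ediv_mul_le L (by omega)

lemma pv_slot_bound (L c : Int) (hc : 0 < c) (i b : Nat)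
    (hi : i < (PySem.Int.floordiv L c).toNat) (hb : b < (PySem.Int.floordiv (c + 1) 2).toNat) :
    0 ≤ c * (i : Int) + 2 * b ∧ c * (i : Int) + 2 * b + 1 ≤ L := by
  obtain ⟨h1, h2⟩ := pv_spc_bracket c hc
  have hL : PySem.Int.floordiv L c * c ≤ L := pv_nc_le L c hc
  have hi' : (i : Int) ≤ PySem.Int.floordiv L c - 1 := by omega
  have hb' : 2 * (b : Int) ≤ c - 1 := by omega
  have hmul : c * (i : Int) ≤ c * (PySem.Int.floordiv L c - 1) :=
    Int.mul_le_mul_of_nonneg_left hi' (le_of_lt hc)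
  have hmul2 : c * (PySem.Int.floordiv L c - 1) = PySem.Int.floordiv L c * c - c := by ring
  have hnn : 0 ≤ c * (i : Int) := mul_nonneg (le_of_lt hc) (by positivity)
  omega

lemma pv_ite_bool (x h : Bool) :
    (if (x && true && !h) = true then (1 : Int) else 0) =
      (if x = true then (if h = true then 0 else 1) else 0) := by
  cases x <;> cases h <;> rfl

lemma pv_sum_to_quad (map_w map_h : Int) (bl oc : List (Int × Int)) (c : Int) (hc : 0 < c) :
    (∑ u ∈ pvUX map_h c (PySem.Int.floordiv map_h c).toNat (PySem.Int.floordiv (c + 1) 2).toNat,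
      ∑ v ∈ pvUX map_w c (PySem.Int.floordiv map_w c).toNat (PySem.Int.floordiv (c + 1) 2).toNat,
        (if pvHitB bl oc (c * v.1 + 2 * v.2) (c * u.1 + 2 * u.2) = true then (0 : Int) else 1)) =
      ∑ j ∈ Finset.range (PySem.Int.floordiv map_h c).toNat,
      ∑ i ∈ Finset.range (PySem.Int.floordiv map_w c).toNat,
      ∑ a ∈ Finset.range (PySem.Int.floordiv (c + 1) 2).toNat,
      ∑ b ∈ Finset.range (PySem.Int.floordiv (c + 1) 2).toNat,
        (if pvA_ok map_w map_h bl oc (c * i + 2 * b) (c * j + 2 * a) then (1 : Int) else 0) := by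
  refine Eq.trans ?_ (Finset.sum_congr rfl (fun j _ => Finset.sum_comm)).symm
  -- target now: filtered double sum = ∑ j ∑ a ∑ i ∑ b
  unfold pvUX
  rw [Finset.sum_filter, Finset.sum_product]
  refine Finset.sum_congr rfl (fun j hj => ?_)
  refine Finset.sum_congr rfl (fun a ha => ?_)
  simp only
  by_cases hY : c * (j : Int) + 2 * a + 1 < map_h
  · rw [if_pos hY, Finset.sum_filter, Finset.sum_product]
    refine Finset.sum_congr rfl (fun i hi => ?_)
    refine Finset.sum_congr rfl (fun b hb => ?_)
    simp only
    have hbx := pv_slot_bound map_w c hc i b (Finset.mem_range.mp hi) (Finset.mem_range.mp hb)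
    have hby := pv_slot_bound map_h c hc j a (Finset.mem_range.mp hj) (Finset.mem_range.mp ha)
    rw [pv_ok_iff map_w map_h bl oc _ _ hbx.2 hby.2, decide_eq_true hY]
    rw [pv_ite_bool]
    by_cases hX : c * (i : Int) + 2 * b + 1 < map_w
    · rw [if_pos hX, decide_eq_true hX, if_pos rfl]
    · rw [if_neg hX, decide_eq_false hX]
      simp
  · rw [if_neg hY]
    refine (Finset.sum_eq_zero (fun i hi => Finset.sum_eq_zero (fun b hb => ?_))).symm
    have hbx := pv_slot_bound map_w c hc i b (Finset.mem_range.mp hi) (Finset.mem_range.mp hb)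
    have hby := pv_slot_bound map_h c hc j a (Finset.mem_range.mp hj) (Finset.mem_range.mp ha)
    rw [pv_ok_iff map_w map_h bl oc _ _ hbx.2 hby.2, decide_eq_false hY]
    simp

lemma pv_main (map_w map_h : Int) (bl oc : List (Int × Int)) (c : Int) (hc : 0 < c) :
    count_free_2x2_slots map_w map_h bl oc c =
      ((pvUX map_h c (PySem.Int.floordiv map_h c).toNat (PySem.Int.floordiv (c + 1) 2).toNat).card : Int) *
        ((pvUX map_w c (PySem.Int.floordiv map_w c).toNat (PySem.Int.floordiv (c + 1) 2).toNat).card : Int) -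
      ((pvT map_w map_h bl oc c (PySem.Int.floordiv map_w c).toNat (PySem.Int.floordiv map_h c).toNat
          (PySem.Int.floordiv (c + 1) 2).toNat).card : Int) := by
  rw [pv_A_formula map_w map_h bl oc c hc, ← pv_sum_to_quad map_w map_h bl oc c hc]
  have hsplit : ∀ u v : Nat × Nat,
      (if pvHitB bl oc (c * v.1 + 2 * v.2) (c * u.1 + 2 * u.2) = true then (0 : Int) else 1) =
        1 - (if pvHitB bl oc (c * v.1 + 2 * v.2) (c * u.1 + 2 * u.2) = true then (1 : Int) else 0) := by
    intro u v
    by_cases h : pvHitB bl oc (c * v.1 + 2 * v.2) (c * u.1 + 2 * u.2) = true <;> simp [h]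
  calc (∑ u ∈ pvUX map_h c _ _, ∑ v ∈ pvUX map_w c _ _,
          (if pvHitB bl oc (c * v.1 + 2 * v.2) (c * u.1 + 2 * u.2) = true then (0 : Int) else 1))
      = ∑ u ∈ pvUX map_h c (PySem.Int.floordiv map_h c).toNat (PySem.Int.floordiv (c + 1) 2).toNat,
          (((pvUX map_w c (PySem.Int.floordiv map_w c).toNat (PySem.Int.floordiv (c + 1) 2).toNat).card : Int) -
           ∑ v ∈ pvUX map_w c (PySem.Int.floordiv map_w c).toNat (PySem.Int.floordiv (c + 1) 2).toNat,
             (if pvHitB bl oc (c * v.1 + 2 * v.2) (c * u.1 + 2 * u.2) = true then (1 : Int) else 0)) := by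
        refine Finset.sum_congr rfl (fun u _ => ?_)
        rw [Finset.sum_congr rfl (fun v _ => hsplit u v), Finset.sum_sub_distrib]
        simp
    _ = _ := by
        rw [Finset.sum_sub_distrib, Finset.sum_const]
        have h2 : (∑ u ∈ pvUX map_h c (PySem.Int.floordiv map_h c).toNat (PySem.Int.floordiv (c + 1) 2).toNat,
            ∑ v ∈ pvUX map_w c (PySem.Int.floordiv map_w c).toNat (PySem.Int.floordiv (c + 1) 2).toNat,
              (if pvHitB bl oc (c * v.1 + 2 * v.2) (c * u.1 + 2 * u.2) = true then (1 : Int) else 0))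
            = ((pvT map_w map_h bl oc c (PySem.Int.floordiv map_w c).toNat (PySem.Int.floordiv map_h c).toNat
                (PySem.Int.floordiv (c + 1) 2).toNat).card : Int) := by
          refine Eq.trans (Finset.sum_product' _ _ _).symm ?_
          unfold pvT
          exact Finset.sum_boole _ _
        rw [h2]
        simp
  
-- ===== the B side: closed-form card of usable slots =====

lemma pv_cardUX (L c : Int) (hc : 0 < c) (hx : 0 < PySem.Int.floordiv L c) :
    (((pvUX L c (PySem.Int.floordiv L c).toNat (PySem.Int.floordiv (c + 1) 2).toNat).card : Int)) =
      PySem.Int.floordiv L c * PySem.Int.floordiv (c + 1) 2 -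
        (if PySem.Int.mod c 2 = 1 ∧ PySem.Int.floordiv L c * c = L then 1 else 0) := by
  obtain ⟨hs1, hs2⟩ := pv_spc_bracket c hc
  have hL : PySem.Int.floordiv L c * c ≤ L := pv_nc_le L c hc
  have hmod : PySem.Int.mod c 2 = c % 2 := PySem.Int.mod_eq_emod_of_pos (by norm_num)
  set ncx := PySem.Int.floordiv L c with hncx
  set spc := PySem.Int.floordiv (c + 1) 2 with hspc
  set N := ncx.toNat with hN
  set S := spc.toNat with hS
  have hcardP : (Finset.range N ×ˢ Finset.range S).card = N * S := by
    rw [Finset.card_product, Finset.card_range, Finset.card_range]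
  have hsplitcard := Finset.card_filter_add_card_filter_not
    (s := Finset.range N ×ˢ Finset.range S) (fun v => c * v.1 + 2 * v.2 + 1 < L)
  have hnegset : (Finset.range N ×ˢ Finset.range S).filter (fun v => ¬ (c * v.1 + 2 * v.2 + 1 < L)) =
      (if PySem.Int.mod c 2 = 1 ∧ ncx * c = L then {(N - 1, S - 1)} else (∅ : Finset (Nat × Nat))) := by
    ext v
    rw [Finset.mem_filter, Finset.mem_product, Finset.mem_range, Finset.mem_range]
    constructor
    · rintro ⟨⟨hi, hb⟩, hno⟩
      have hbd := pv_slot_bound L c hc v.1 v.2 hi hb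
      have heq : c * (v.1 : Int) + 2 * v.2 + 1 = L := by omega
      have hi' : (v.1 : Int) ≤ ncx - 1 := by omega
      have hmul : c * (v.1 : Int) ≤ c * (ncx - 1) := Int.mul_le_mul_of_nonneg_left hi' (le_of_lt hc)
      have hmul2 : c * (ncx - 1) = ncx * c - c := by ring
      have h2b : 2 * (v.2 : Int) ≤ c - 1 := by omega
      -- forced equalities
      have hA : c * (v.1 : Int) = ncx * c - c := by omega
      have h2b' : 2 * (v.2 : Int) = c - 1 := by omega
      have hBL : ncx * c = L := by omega
      have hodd : PySem.Int.mod c 2 = 1 := by omega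
      have hieq : (v.1 : Int) = ncx - 1 := by
        have : c * (v.1 : Int) = c * (ncx - 1) := by omega
        exact mul_left_cancel₀ (by omega) this
      have hceq : c + 1 = 2 * spc := by omega
      have hv1 : v.1 = N - 1 := by omega
      have hv2 : v.2 = S - 1 := by omega
      rw [if_pos ⟨hodd, hBL⟩, Finset.mem_singleton]
      exact Prod.ext hv1 hv2
    · intro hv
      by_cases hcond : PySem.Int.mod c 2 = 1 ∧ ncx * c = L
      · rw [if_pos hcond, Finset.mem_singleton] at hv
        have hS1 : 1 ≤ spc := by omega
        have hN1 : 1 ≤ ncx := hx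
        have hceq : c + 1 = 2 * spc := by omega
        subst hv
        have hv1 : ((N - 1 : Nat) : Int) = ncx - 1 := by omega
        have hv2 : ((S - 1 : Nat) : Int) = spc - 1 := by omega
        refine ⟨⟨by omega, by omega⟩, ?_⟩
        have hmul2 : c * (ncx - 1) = ncx * c - c := by ring
        rw [hv1, hv2]
        omega
      · rw [if_neg hcond] at hv
        simp at hv
  have hcast1 : (N : Int) = ncx := by omega
  have hcast2 : (S : Int) = spc := by omega
  by_cases hcond : PySem.Int.mod c 2 = 1 ∧ ncx * c = L
  · rw [if_pos hcond]
    rw [hnegset, if_pos hcond, Finset.card_singleton] at hsplitcard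
    unfold pvUX
    have : ((Finset.range N ×ˢ Finset.range S).filter (fun v => c * v.1 + 2 * v.2 + 1 < L)).card
        = N * S - 1 := by omega
    rw [this]
    have hS1 : 1 ≤ S := by omega
    have hN1 : 1 ≤ N := by omega
    push_cast [Nat.cast_sub (by nlinarith : 1 ≤ N * S)]
    rw [hcast1, hcast2]
  · rw [if_neg hcond]
    rw [hnegset, if_neg hcond, Finset.card_empty] at hsplitcard
    unfold pvUX
    have : ((Finset.range N ×ˢ Finset.range S).filter (fun v => c * v.1 + 2 * v.2 + 1 < L)).card
        = N * S := by omega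
    rw [this]
    push_cast
    rw [hcast1, hcast2]
    ring

-- ===== the B side: the dead-slot set =====

def pvDeadL (map_w map_h : Int) (bl oc : List (Int × Int)) (c ncx ncy : Int) : List (Int × Int) :=
  (PySem.Set.union (PySem.Set.ofList bl) oc).foldl
    (fun dead p =>
      (pvB_starts c p.1 ncx map_w).foldl
        (fun dead sx =>
          (pvB_starts c p.2 ncy map_h).foldl
            (fun dead sy => PySem.Set.add dead (sx, sy)) dead) dead)
    PySem.Set.empty

lemma pv_alt_eq (map_w map_h : Int) (bl oc : List (Int × Int)) (c : Int) (hc : 0 < c)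
    (hx : 0 < PySem.Int.floordiv map_w c) (hy : 0 < PySem.Int.floordiv map_h c) :
    count_free_2x2_slots_alt map_w map_h bl oc c =
      (PySem.Int.floordiv map_w c * PySem.Int.floordiv (c + 1) 2 -
        (if PySem.Int.mod c 2 = 1 ∧ PySem.Int.floordiv map_w c * c = map_w then 1 else 0)) *
      (PySem.Int.floordiv map_h c * PySem.Int.floordiv (c + 1) 2 -
        (if PySem.Int.mod c 2 = 1 ∧ PySem.Int.floordiv map_h c * c = map_h then 1 else 0)) -
      ((pvDeadL map_w map_h bl oc c (PySem.Int.floordiv map_w c) (PySem.Int.floordiv map_h c)).length : Int) := by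
  unfold count_free_2x2_slots_alt pvDeadL
  rw [if_neg (by omega), if_neg (by omega)]

lemma pv_mem_syfold (l : List Int) (sx : Int) (d : PySem.Set (Int × Int)) (q : Int × Int) :
    (q ∈ l.foldl (fun d sy => PySem.Set.add d (sx, sy)) d) ↔ q ∈ d ∨ ∃ sy ∈ l, q = (sx, sy) := by
  induction l generalizing d with
  | nil => simp
  | cons y t ih =>
      rw [List.foldl_cons, ih, PySem.Set.mem_add]
      simp only [List.mem_cons]
      aesop

lemma pv_nodup_syfold (l : List Int) (sx : Int) (d : PySem.Set (Int × Int)) (hd : d.Nodup) :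
    (l.foldl (fun d sy => PySem.Set.add d (sx, sy)) d).Nodup := by
  induction l generalizing d with
  | nil => exact hd
  | cons y t ih => exact ih _ (PySem.Set.nodup_add _ _ hd)

lemma pv_mem_sxfold (lx ly : List Int) (d : PySem.Set (Int × Int)) (q : Int × Int) :
    (q ∈ lx.foldl (fun d sx => ly.foldl (fun d sy => PySem.Set.add d (sx, sy)) d) d) ↔
      q ∈ d ∨ ∃ sx ∈ lx, ∃ sy ∈ ly, q = (sx, sy) := by
  induction lx generalizing d with
  | nil => simp
  | cons x t ih =>
      rw [List.foldl_cons, ih, pv_mem_syfold]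
      simp only [List.mem_cons]
      aesop

lemma pv_nodup_sxfold (lx ly : List Int) (d : PySem.Set (Int × Int)) (hd : d.Nodup) :
    (lx.foldl (fun d sx => ly.foldl (fun d sy => PySem.Set.add d (sx, sy)) d) d).Nodup := by
  induction lx generalizing d with
  | nil => exact hd
  | cons x t ih => exact ih _ (pv_nodup_syfold _ _ _ hd)

lemma pv_mem_cellfold (map_w map_h c ncx ncy : Int) (cells : List (Int × Int))
    (d : PySem.Set (Int × Int)) (q : Int × Int) :
    (q ∈ cells.foldl
      (fun dead p =>
        (pvB_starts c p.1 ncx map_w).foldl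
          (fun dead sx =>
            (pvB_starts c p.2 ncy map_h).foldl
              (fun dead sy => PySem.Set.add dead (sx, sy)) dead) dead) d) ↔
      q ∈ d ∨ ∃ p ∈ cells, q.1 ∈ pvB_starts c p.1 ncx map_w ∧ q.2 ∈ pvB_starts c p.2 ncy map_h := by
  induction cells generalizing d with
  | nil => simp
  | cons p t ih =>
      rw [List.foldl_cons, ih, pv_mem_sxfold]
      simp only [List.mem_cons]
      constructor
      · rintro ((h | ⟨sx, hsx, sy, hsy, rfl⟩) | ⟨p', hp', h1, h2⟩)
        · exact Or.inl h
        · exact Or.inr ⟨p, Or.inl rfl, hsx, hsy⟩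
        · exact Or.inr ⟨p', Or.inr hp', h1, h2⟩
      · rintro (h | ⟨p', (rfl | hp'), h1, h2⟩)
        · exact Or.inl (Or.inl h)
        · refine Or.inl (Or.inr ⟨q.1, h1, q.2, h2, ?_⟩)
          rfl
        · exact Or.inr ⟨p', hp', h1, h2⟩

lemma pv_nodup_cellfold (map_w map_h c ncx ncy : Int) (cells : List (Int × Int))
    (d : PySem.Set (Int × Int)) (hd : d.Nodup) :
    (cells.foldl
      (fun dead p =>
        (pvB_starts c p.1 ncx map_w).foldl
          (fun dead sx =>
            (pvB_starts c p.2 ncy map_h).foldl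
              (fun dead sy => PySem.Set.add dead (sx, sy)) dead) dead) d).Nodup := by
  induction cells generalizing d with
  | nil => exact hd
  | cons p t ih => exact ih _ (pv_nodup_sxfold _ _ _ hd)

lemma pv_mem_starts (c v n limit s : Int) :
    s ∈ pvB_starts c v n limit ↔ (s = v - 1 ∨ s = v) ∧
      (0 ≤ PySem.Int.floordiv s c ∧ PySem.Int.floordiv s c < n ∧
        PySem.Int.mod (PySem.Int.mod s c) 2 = 0 ∧ s + 1 < limit) := by
  unfold pvB_starts
  simp only [List.foldl_cons, List.foldl_nil]
  by_cases h1 : 0 ≤ PySem.Int.floordiv (v - 1) c ∧ PySem.Int.floordiv (v - 1) c < n ∧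
      PySem.Int.mod (PySem.Int.mod (v - 1) c) 2 = 0 ∧ (v - 1) + 1 < limit <;>
  by_cases h2 : 0 ≤ PySem.Int.floordiv v c ∧ PySem.Int.floordiv v c < n ∧
      PySem.Int.mod (PySem.Int.mod v c) 2 = 0 ∧ v + 1 < limit
  · rw [if_pos h1, if_pos h2]
    simp only [List.nil_append, List.cons_append, List.mem_cons, List.not_mem_nil, or_false]
    constructor
    · rintro (rfl | rfl)
      exacts [⟨Or.inl rfl, h1⟩, ⟨Or.inr rfl, h2⟩]
    · rintro ⟨rfl | rfl, _⟩
      exacts [Or.inl rfl, Or.inr rfl]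
  · rw [if_pos h1, if_neg h2]
    simp only [List.nil_append, List.mem_singleton]
    constructor
    · rintro rfl
      exact ⟨Or.inl rfl, h1⟩
    · rintro ⟨rfl | rfl, hh⟩
      exacts [rfl, absurd hh h2]
  · rw [if_neg h1, if_pos h2]
    simp only [List.nil_append, List.mem_singleton]
    constructor
    · rintro rfl
      exact ⟨Or.inr rfl, h2⟩
    · rintro ⟨rfl | rfl, hh⟩
      exacts [absurd hh h1, rfl]
  · rw [if_neg h1, if_neg h2]
    simp only [List.not_mem_nil, false_iff]
    rintro ⟨rfl | rfl, hh⟩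
    exacts [h1 hh, h2 hh]

lemma pv_valid_iff (c n limit s : Int) (hc : 0 < c) :
    (0 ≤ PySem.Int.floordiv s c ∧ PySem.Int.floordiv s c < n ∧
      PySem.Int.mod (PySem.Int.mod s c) 2 = 0 ∧ s + 1 < limit) ↔
    (∃ i : Nat, i < n.toNat ∧ ∃ b : Nat, b < (PySem.Int.floordiv (c + 1) 2).toNat ∧
      s = c * i + 2 * b) ∧ s + 1 < limit := by
  obtain ⟨hs1, hs2⟩ := pv_spc_bracket c hc
  have hqr := PySem.Int.floordiv_mul_add_mod s c
  have hmod2 : ∀ a : Int, PySem.Int.mod a 2 = a % 2 := fun a => PySem.Int.mod_eq_emod_of_pos (by norm_num)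
  have hmodc : PySem.Int.mod s c = s % c := PySem.Int.mod_eq_emod_of_pos hc
  have hr0 : 0 ≤ PySem.Int.mod s c := by rw [hmodc]; exact Int.emod_nonneg s (by omega)
  have hrc : PySem.Int.mod s c < c := by rw [hmodc]; exact Int.emod_lt_of_pos s hc
  constructor
  · rintro ⟨hq0, hqn, hrev, hlim⟩
    rw [hmod2] at hrev
    have ht : PySem.Int.mod s c = 2 * (PySem.Int.mod s c / 2) := by omega
    refine ⟨⟨(PySem.Int.floordiv s c).toNat, by omega, (PySem.Int.mod s c / 2).toNat, by omega, ?_⟩, hlim⟩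
    have h1 : ((PySem.Int.floordiv s c).toNat : Int) = PySem.Int.floordiv s c := by omega
    have h2 : ((PySem.Int.mod s c / 2).toNat : Int) = PySem.Int.mod s c / 2 := by omega
    rw [h1, h2]
    calc s = PySem.Int.floordiv s c * c + PySem.Int.mod s c := hqr.symm
    _ = c * PySem.Int.floordiv s c + 2 * (PySem.Int.mod s c / 2) := by rw [mul_comm]; omega
  · rintro ⟨⟨i, hi, b, hb, rfl⟩, hlim⟩
    have h2b : 2 * (b : Int) ≤ c - 1 := by omega
    have hfd : PySem.Int.floordiv (c * i + 2 * b) c = i := by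
      rw [PySem.Int.floordiv_eq_iff_of_pos hc]
      constructor
      · have : (i : Int) * c = c * i := by ring
        omega
      · have : ((i : Int) + 1) * c = c * i + c := by ring
        omega
    have hmd : PySem.Int.mod (c * i + 2 * b) c = 2 * b := by
      have := PySem.Int.floordiv_mul_add_mod (c * (i : Int) + 2 * b) c
      rw [hfd] at this
      have h3 : (i : Int) * c = c * i := by ring
      omega
    refine ⟨by omega, by omega, ?_, hlim⟩
    rw [hmd, hmod2]
    omega

lemma pv_slot_inj (c : Int) (hc : 0 < c) (i b i' b' : Nat)
    (hb : 2 * (b : Int) < c) (hb' : 2 * (b' : Int) < c)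
    (h : c * (i : Int) + 2 * b = c * (i' : Int) + 2 * b') : i = i' ∧ b = b' := by
  rw [mul_comm c (i : Int), mul_comm c (i' : Int)] at h
  have e1 : (2 * (b : Int) + (i : Int) * c) / c = (i : Int) := by
    rw [Int.add_mul_ediv_right _ _ (show c ≠ 0 by omega),
      Int.ediv_eq_zero_of_lt (by positivity) hb]
    omega
  have e2 : (2 * (b' : Int) + (i' : Int) * c) / c = (i' : Int) := by
    rw [Int.add_mul_ediv_right _ _ (show c ≠ 0 by omega),
      Int.ediv_eq_zero_of_lt (by positivity) hb']
    omega
  have h' : (2 * (b : Int) + (i : Int) * c) = (2 * (b' : Int) + (i' : Int) * c) := by omega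
  rw [h', e2] at e1
  constructor
  · omega
  · have : (i : Int) * c = (i' : Int) * c := by rw [e1]
    omega

lemma pv_dead_char (map_w map_h : Int) (bl oc : List (Int × Int)) (c : Int) (hc : 0 < c)
    (q : Int × Int) :
    q ∈ pvDeadL map_w map_h bl oc c (PySem.Int.floordiv map_w c) (PySem.Int.floordiv map_h c) ↔
      ((∃ i : Nat, i < (PySem.Int.floordiv map_w c).toNat ∧ ∃ b : Nat,
          b < (PySem.Int.floordiv (c + 1) 2).toNat ∧ q.1 = c * i + 2 * b) ∧ q.1 + 1 < map_w) ∧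
      ((∃ j : Nat, j < (PySem.Int.floordiv map_h c).toNat ∧ ∃ a : Nat,
          a < (PySem.Int.floordiv (c + 1) 2).toNat ∧ q.2 = c * j + 2 * a) ∧ q.2 + 1 < map_h) ∧
      pvHitB bl oc q.1 q.2 = true := by
  unfold pvDeadL
  rw [pv_mem_cellfold]
  have hemp : (q ∈ (PySem.Set.empty : PySem.Set (Int × Int))) ↔ False := by
    simp [PySem.Set.empty]
  rw [hemp, false_or]
  constructor
  · rintro ⟨p, hp, h1, h2⟩
    rw [pv_mem_starts] at h1 h2
    obtain ⟨hq1, hv1⟩ := h1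
    obtain ⟨hq2, hv2⟩ := h2
    have hx := (pv_valid_iff c (PySem.Int.floordiv map_w c) map_w q.1 hc).mp hv1
    have hy := (pv_valid_iff c (PySem.Int.floordiv map_h c) map_h q.2 hc).mp hv2
    refine ⟨hx, hy, ?_⟩
    have hpm : p ∈ bl ∨ p ∈ oc := by
      rw [PySem.Set.mem_union, PySem.Set.mem_ofList] at hp
      exact hp
    obtain ⟨px, py⟩ := p
    simp only at hq1 hq2
    simp only [pvHitB, Bool.or_eq_true, List.contains_iff_mem]
    rcases hq1 with h1 | h1 <;> rcases hq2 with h2' | h2'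
    · have ex : px = q.1 + 1 := by omega
      have ey : py = q.2 + 1 := by omega
      subst ex ey
      tauto
    · have ex : px = q.1 + 1 := by omega
      have ey : py = q.2 := by omega
      subst ex ey
      tauto
    · have ex : px = q.1 := by omega
      have ey : py = q.2 + 1 := by omega
      subst ex ey
      tauto
    · have ex : px = q.1 := by omega
      have ey : py = q.2 := by omega
      subst ex ey
      tauto
  · rintro ⟨⟨hex1, hb1⟩, ⟨hex2, hb2⟩, hhit⟩
    have hv1 := (pv_valid_iff c (PySem.Int.floordiv map_w c) map_w q.1 hc).mpr ⟨hex1, hb1⟩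
    have hv2 := (pv_valid_iff c (PySem.Int.floordiv map_h c) map_h q.2 hc).mpr ⟨hex2, hb2⟩
    have build : ∀ px py : Int, ((px, py) ∈ bl ∨ (px, py) ∈ oc) →
        (px = q.1 ∨ px = q.1 + 1) → (py = q.2 ∨ py = q.2 + 1) →
        ∃ p ∈ PySem.Set.union (PySem.Set.ofList bl) oc,
          q.1 ∈ pvB_starts c p.1 (PySem.Int.floordiv map_w c) map_w ∧
          q.2 ∈ pvB_starts c p.2 (PySem.Int.floordiv map_h c) map_h := by
      intro px py hm e1 e2
      refine ⟨(px, py), ?_, ?_, ?_⟩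
      · rw [PySem.Set.mem_union, PySem.Set.mem_ofList]
        exact hm
      · rw [pv_mem_starts]
        exact ⟨by simp only; omega, hv1⟩
      · rw [pv_mem_starts]
        exact ⟨by simp only; omega, hv2⟩
    simp only [pvHitB, Bool.or_eq_true, List.contains_iff_mem] at hhit
    rcases hhit with ((((((hm | hm) | hm) | hm) | hm) | hm) | hm) | hm
    · exact build q.1 q.2 (Or.inl hm) (Or.inl rfl) (Or.inl rfl)
    · exact build q.1 q.2 (Or.inr hm) (Or.inl rfl) (Or.inl rfl)
    · exact build (q.1 + 1) q.2 (Or.inl hm) (Or.inr rfl) (Or.inl rfl)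
    · exact build (q.1 + 1) q.2 (Or.inr hm) (Or.inr rfl) (Or.inl rfl)
    · exact build q.1 (q.2 + 1) (Or.inl hm) (Or.inl rfl) (Or.inr rfl)
    · exact build q.1 (q.2 + 1) (Or.inr hm) (Or.inl rfl) (Or.inr rfl)
    · exact build (q.1 + 1) (q.2 + 1) (Or.inl hm) (Or.inr rfl) (Or.inr rfl)
    · exact build (q.1 + 1) (q.2 + 1) (Or.inr hm) (Or.inr rfl) (Or.inr rfl)

lemma pv_dead_len (map_w map_h : Int) (bl oc : List (Int × Int)) (c : Int) (hc : 0 < c) :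
    (((pvDeadL map_w map_h bl oc c (PySem.Int.floordiv map_w c) (PySem.Int.floordiv map_h c)).length : Int)) =
      ((pvT map_w map_h bl oc c (PySem.Int.floordiv map_w c).toNat (PySem.Int.floordiv map_h c).toNat
        (PySem.Int.floordiv (c + 1) 2).toNat).card : Int) := by
  obtain ⟨hs1, hs2⟩ := pv_spc_bracket c hc
  have hnd : (pvDeadL map_w map_h bl oc c (PySem.Int.floordiv map_w c) (PySem.Int.floordiv map_h c)).Nodup := by
    unfold pvDeadL
    exact pv_nodup_cellfold _ _ _ _ _ _ _ (by simp [PySem.Set.empty])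
  have h2b : ∀ b : Nat, b < (PySem.Int.floordiv (c + 1) 2).toNat → 2 * (b : Int) < c := by
    intro b hb
    omega
  have himg : Finset.image (fun w : (Nat × Nat) × (Nat × Nat) =>
        ((c * w.2.1 + 2 * w.2.2 : Int), (c * w.1.1 + 2 * w.1.2 : Int)))
      (pvT map_w map_h bl oc c (PySem.Int.floordiv map_w c).toNat (PySem.Int.floordiv map_h c).toNat
        (PySem.Int.floordiv (c + 1) 2).toNat) =
      (pvDeadL map_w map_h bl oc c (PySem.Int.floordiv map_w c) (PySem.Int.floordiv map_h c)).toFinset := by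
    ext q
    rw [Finset.mem_image, List.mem_toFinset, pv_dead_char map_w map_h bl oc c hc q]
    constructor
    · rintro ⟨w, hw, rfl⟩
      unfold pvT pvUX at hw
      rw [Finset.mem_filter, Finset.mem_product, Finset.mem_filter, Finset.mem_product,
        Finset.mem_filter, Finset.mem_product, Finset.mem_range, Finset.mem_range,
        Finset.mem_range, Finset.mem_range] at hw
      obtain ⟨⟨⟨⟨hj, ha⟩, hyb⟩, ⟨⟨hi, hb⟩, hxb⟩⟩, hhit⟩ := hw
      exact ⟨⟨⟨w.2.1, hi, w.2.2, hb, rfl⟩, hxb⟩, ⟨⟨w.1.1, hj, w.1.2, ha, rfl⟩, hyb⟩, hhit⟩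
    · rintro ⟨⟨⟨i, hi, b, hb, he1⟩, hb1⟩, ⟨⟨j, hj, a, ha, he2⟩, hb2⟩, hhit⟩
      refine ⟨((j, a), (i, b)), ?_, ?_⟩
      · unfold pvT pvUX
        rw [Finset.mem_filter, Finset.mem_product, Finset.mem_filter, Finset.mem_product,
          Finset.mem_filter, Finset.mem_product, Finset.mem_range, Finset.mem_range,
          Finset.mem_range, Finset.mem_range]
        refine ⟨⟨⟨⟨hj, ha⟩, ?_⟩, ⟨⟨hi, hb⟩, ?_⟩⟩, ?_⟩
        · simp only
          omega
        · simp only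
          omega
        · simp only
          rw [← he1, ← he2]
          exact hhit
      · simp only
        rw [← he1, ← he2]
  have hinj : Set.InjOn (fun w : (Nat × Nat) × (Nat × Nat) =>
        ((c * w.2.1 + 2 * w.2.2 : Int), (c * w.1.1 + 2 * w.1.2 : Int)))
      ↑(pvT map_w map_h bl oc c (PySem.Int.floordiv map_w c).toNat (PySem.Int.floordiv map_h c).toNat
        (PySem.Int.floordiv (c + 1) 2).toNat) := by
    rintro ⟨⟨j, a⟩, i, b⟩ hw ⟨⟨j', a'⟩, i', b'⟩ hw' heq
    rw [Finset.mem_coe] at hw hw'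
    unfold pvT pvUX at hw hw'
    rw [Finset.mem_filter, Finset.mem_product, Finset.mem_filter, Finset.mem_product,
      Finset.mem_filter, Finset.mem_product, Finset.mem_range, Finset.mem_range,
      Finset.mem_range, Finset.mem_range] at hw hw'
    have e1 := congrArg Prod.fst heq
    have e2 := congrArg Prod.snd heq
    simp only at e1 e2
    obtain ⟨ei, eb⟩ := pv_slot_inj c hc i b i' b' (h2b b hw.1.2.1.2) (h2b b' hw'.1.2.1.2) e1
    obtain ⟨ej, ea⟩ := pv_slot_inj c hc j a j' a' (h2b a hw.1.1.1.2) (h2b a' hw'.1.1.1.2) e2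
    subst ei eb ej ea
    rfl
  calc ((pvDeadL map_w map_h bl oc c (PySem.Int.floordiv map_w c) (PySem.Int.floordiv map_h c)).length : Int)
      = ((pvDeadL map_w map_h bl oc c (PySem.Int.floordiv map_w c) (PySem.Int.floordiv map_h c)).toFinset.card : Int) := by
        rw [List.toFinset_card_of_nodup hnd]
    _ = _ := by
        rw [← himg, Finset.card_image_of_injOn hinj]

lemma pv_range2_nil (c : Int) (hcn : c ≤ 0) : PySem.List.pyRange 0 c 2 = [] := by
  rw [PySem.List.pyRange_of_pos 0 c (by norm_num), if_neg (by omega)]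
  simp

lemma pv_A_neg (map_w map_h : Int) (bl oc : List (Int × Int)) (c : Int) (hcn : c < 0) :
    count_free_2x2_slots map_w map_h bl oc c = 0 := by
  have hdy : ∀ cx cy free, pvA_dyLoop map_w map_h bl oc c cx cy free = free := by
    intro cx cy free
    unfold pvA_dyLoop
    rw [pv_range2_nil c (by omega)]
    rfl
  have hcx : ∀ cy l free, pvA_cxLoop map_w map_h bl oc c cy l free = free := by
    intro cy l
    induction l with
    | nil => intro free; rfl
    | cons x t ih =>
        intro free
        rw [pvA_cxLoop]
        by_cases h : x + c > map_w
        · rw [if_pos h]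
        · rw [if_neg h, hdy, ih]
  have hcy : ∀ l free, pvA_cyLoop map_w map_h bl oc c l free = free := by
    intro l
    induction l with
    | nil => intro free; rfl
    | cons y t ih =>
        intro free
        rw [pvA_cyLoop]
        by_cases h : y + c > map_h
        · rw [if_pos h]
        · rw [if_neg h, hcx, ih]
  unfold count_free_2x2_slots
  exact hcy _ 0

lemma pv_UX_zero (L c : Int) (S : Nat) : pvUX L c 0 S = ∅ := by
  unfold pvUX
  simp

-- ===== VERDICT (by name: the statement is the Claim_ definition above) =====
theorem count_free_2x2_slots_spec : Claim_equal_count_free_2x2_slots := by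
  unfold Claim_equal_count_free_2x2_slots
  intro map_w map_h bl oc c _ hpre
  unfold Spec_count_free_2x2_slots
  unfold Pre_count_free_2x2_slots at hpre
  rcases lt_trichotomy c 0 with hc | hc | hc
  · rw [pv_A_neg map_w map_h bl oc c hc]
    unfold count_free_2x2_slots_alt
    rw [if_pos (by omega)]
  · exact absurd hc hpre
  · by_cases hbr : PySem.Int.floordiv map_w c ≤ 0 ∨ PySem.Int.floordiv map_h c ≤ 0
    · rw [pv_main map_w map_h bl oc c hc]
      unfold count_free_2x2_slots_alt
      rw [if_neg (by omega), if_pos hbr]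
      rcases hbr with h | h
      · have hN : (PySem.Int.floordiv map_w c).toNat = 0 := by omega
        rw [hN]
        unfold pvT
        rw [pv_UX_zero, Finset.product_empty, Finset.filter_empty]
        simp
      · have hM : (PySem.Int.floordiv map_h c).toNat = 0 := by omega
        rw [hM]
        unfold pvT
        rw [pv_UX_zero, Finset.empty_product, Finset.filter_empty]
        simp
    · rw [not_or, not_le, not_le] at hbr
      rw [pv_main map_w map_h bl oc c hc, pv_alt_eq map_w map_h bl oc c hc hbr.1 hbr.2,
        pv_cardUX map_w c hc hbr.1, pv_cardUX map_h c hc hbr.2, pv_dead_len map_w map_h bl oc c hc]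
      ring
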